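-- pv_equiv track=rewrite | github.com/VishalTheHuman/Leet-Code | 2483. Minimum Penalty for a Shop/Solution_1.py | bestClosingTime
-- ===== SOURCE A (Python) =====
-- def bestClosingTime(customers: str) -> int:
--     ind = 0
--     min_penalty = count = customers.count("Y")
--     for i, ch in enumerate(customers):
--         count += 1 if ch=="N" else -1
--         if count < min_penalty:
--             min_penalty = count
--             ind = i+1
--     return ind
-- ===== SOURCE B (Python) =====
-- def bestClosingTime(customers: str) -> int:
--     # Staged prefix/suffix-array decomposition + library argmin:
--     # build the full penalty table pens[j] = prefN[j] + sufC[j], then take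
--     # the first index of its minimum with min()/index() (no running minimum).
--     n = len(customers)
--     prefN = [0] * (n + 1)          # prefN[j]: open hours with no customer before hour j
--     for i in range(n):
--         prefN[i + 1] = prefN[i] + (customers[i] == 'N')
--     sufC = [0] * (n + 1)           # sufC[j]: closed hours with a customer at/after hour j
--     for i in range(n - 1, -1, -1):
--         sufC[i] = sufC[i + 1] + (customers[i] != 'N')
--     pens = [prefN[j] + sufC[j] for j in range(n + 1)]
--     return pens.index(min(pens))
-- ===== Notes on version B (the rewrite author's own statement) =====
-- stated objective: alternative
-- what changed: B materializes the whole penalty table from separately built prefix (open hours without customers) and suffix (closed hours with customers) count arrays and picks the answer with min()+list.index() (first occurrence of the minimum), instead of A's single fused scan with a running signed counter and running-minimum tie-break tracking.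
import Mathlib
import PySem

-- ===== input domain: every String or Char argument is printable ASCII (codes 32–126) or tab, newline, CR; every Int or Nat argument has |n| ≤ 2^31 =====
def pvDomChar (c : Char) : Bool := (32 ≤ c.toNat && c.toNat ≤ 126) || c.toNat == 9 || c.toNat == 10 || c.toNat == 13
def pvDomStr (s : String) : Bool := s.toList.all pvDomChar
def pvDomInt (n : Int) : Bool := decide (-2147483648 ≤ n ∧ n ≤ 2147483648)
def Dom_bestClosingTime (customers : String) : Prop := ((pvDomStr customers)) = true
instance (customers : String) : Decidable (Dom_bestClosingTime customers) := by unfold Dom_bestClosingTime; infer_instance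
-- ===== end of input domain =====

-- B replaces A's fused running-minimum scan by staged prefix/suffix count arrays,
-- a materialized penalty table and min()+index() argmin (objective: alternative; same O(n) cost).

-- ===== PORT A =====
-- A's loop: state (ind, min_penalty, count); i is the enumerate index
def bestClosingTimeGo : List Char → Int → Int → Int → Int → Int
  | [], _, ind, _, _ => ind
  | ch :: rest, i, ind, minp, count =>
    let count' := count + (if ch == 'N' then (1 : Int) else -1)
    if count' < minp then bestClosingTimeGo rest (i + 1) (i + 1) count' count'
    else bestClosingTimeGo rest (i + 1) ind minp count'

def bestClosingTime (customers : String) : Int :=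
  let c0 : Int := (PySem.Str.count customers "Y" : Int)
  bestClosingTimeGo customers.toList 0 0 c0 c0

-- ===== PORT B =====
def bestClosingTime_alt (customers : String) : Int :=
  let cs := customers.toList
  let n := cs.length
  -- for i in range(n): prefN[i+1] = prefN[i] + (customers[i] == 'N')
  let prefN := (List.range n).foldl
    (fun arr i => arr.set (i + 1) (arr.getD i 0 + (if cs.getD i ' ' == 'N' then (1 : Int) else 0)))
    (List.replicate (n + 1) (0 : Int))
  -- for i in range(n-1, -1, -1): sufC[i] = sufC[i+1] + (customers[i] != 'N')
  -- ((List.range n).reverse iterates i = n-1, …, 0, exactly Python's countdown range)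
  let sufC := ((List.range n).reverse).foldl
    (fun arr i => arr.set i (arr.getD (i + 1) 0 + (if cs.getD i ' ' ≠ 'N' then (1 : Int) else 0)))
    (List.replicate (n + 1) (0 : Int))
  let pens := (List.range (n + 1)).map (fun j => prefN.getD j 0 + sufC.getD j 0)
  -- pens is nonempty and min(pens) ∈ pens, so Python's min/.index never raise;
  -- the .getD defaults below are never taken.
  (((PySem.List.index? pens ((PySem.List.min? pens (fun y => y)).getD 0)).getD 0 : Nat) : Int)

-- ===== PRECONDITION & SPEC =====
def Spec_bestClosingTime (customers : String) (out : Int) : Prop := out = bestClosingTime_alt customers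
instance (customers : String) (out : Int) : Decidable (Spec_bestClosingTime customers out) := by unfold Spec_bestClosingTime; infer_instance

-- ===== CLAIM (what is proved, stated in full; the proofs are below) =====
def Claim_equal_bestClosingTime : Prop := ∀ (customers : String), Dom_bestClosingTime customers → Spec_bestClosingTime customers (bestClosingTime customers)

-- ===== LEMMAS AND PROOFS =====

-- counts of 'N' / non-'N' characters, as integers
def cntN (l : List Char) : Int := (l.countP (fun c => c == 'N') : Int)
def cntC (l : List Char) : Int := (l.countP (fun c => !(c == 'N')) : Int)

-- the running-counter sequence of A's loop
def countsFrom : List Char → Int → List Int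
  | [], _ => []
  | ch :: r, c =>
    let c' := c + (if ch == 'N' then (1 : Int) else -1)
    c' :: countsFrom r c'

-- generic "first strict improvement" scan (A's loop with the counter abstracted away)
def fam : List Int → Int → Int → Int → Int
  | [], _, bi, _ => bi
  | x :: r, i, bi, bm => if x < bm then fam r (i + 1) i x else fam r (i + 1) bi bm

-- (first argmin index, minimum value) of a list
def argmin? : List Int → Option (Nat × Int)
  | [] => none
  | x :: r =>
    match argmin? r with
    | none => some (0, x)
    | some (j, m) => if x ≤ m then some (0, x) else some (j + 1, m)

theorem argmin?_cons_none (x : Int) (r : List Int) (hr : argmin? r = none) :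
    argmin? (x :: r) = some (0, x) := by
  simp only [argmin?, hr]

theorem argmin?_cons_some (x : Int) (r : List Int) (j : Nat) (m : Int)
    (hr : argmin? r = some (j, m)) :
    argmin? (x :: r) = if x ≤ m then some (0, x) else some (j + 1, m) := by
  simp only [argmin?, hr]

theorem argmin?_eq_none_iff (l : List Int) : argmin? l = none ↔ l = [] := by
  cases l with
  | nil => simp [argmin?]
  | cons x r =>
    cases hr : argmin? r with
    | none => simp [argmin?_cons_none x r hr]
    | some p =>
      obtain ⟨j, m⟩ := p
      rw [argmin?_cons_some x r j m hr]
      by_cases h : x ≤ m <;> simp [h]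

theorem go_eq_fam (cs : List Char) : ∀ (i ind minp c : Int),
    bestClosingTimeGo cs i ind minp c = fam (countsFrom cs c) (i + 1) ind minp := by
  induction cs with
  | nil => intro i ind minp c; rfl
  | cons ch r ih =>
    intro i ind minp c
    simp only [bestClosingTimeGo, countsFrom, fam]
    split_ifs <;> rw [ih]

theorem fam_char (r : List Int) : ∀ (i bi bm : Int),
    fam r i bi bm = (match argmin? r with
      | none => bi
      | some (j, m) => if m < bm then i + (j : Int) else bi) := by
  induction r with
  | nil => intro i bi bm; rfl
  | cons x r ih =>
    intro i bi bm
    simp only [fam, ih]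
    cases hr : argmin? r with
    | none =>
      simp only [argmin?_cons_none x r hr]
      split_ifs <;> simp
    | some p =>
      obtain ⟨j, m⟩ := p
      simp only [argmin?_cons_some x r j m hr]
      by_cases hxm : x ≤ m
      · simp only [if_pos hxm]
        split_ifs <;> (push_cast; first | rfl | linarith)
      · simp only [if_neg hxm]
        split_ifs <;> (push_cast; first | rfl | linarith)

theorem argmin?_props (l : List Int) : ∀ (j : Nat) (m : Int), argmin? l = some (j, m) →
    m ∈ l ∧ (∀ y ∈ l, m ≤ y) ∧ PySem.List.index? l m = some j := by
  induction l with
  | nil => intro j m h; simp [argmin?] at h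
  | cons x r ih =>
    intro j m h
    cases hr : argmin? r with
    | none =>
      have hre : r = [] := (argmin?_eq_none_iff r).mp hr
      subst hre
      rw [argmin?_cons_none x [] hr] at h
      simp only [Option.some.injEq, Prod.mk.injEq] at h
      obtain ⟨hj, hm⟩ := h
      subst hj; subst hm
      refine ⟨by simp, by simp, ?_⟩
      rw [PySem.List.index?_cons_self]
    | some p =>
      obtain ⟨j0, m0⟩ := p
      obtain ⟨hmem0, hmin0, hidx0⟩ := ih j0 m0 hr
      rw [argmin?_cons_some x r j0 m0 hr] at h
      by_cases hxm : x ≤ m0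
      · rw [if_pos hxm] at h
        simp only [Option.some.injEq, Prod.mk.injEq] at h
        obtain ⟨hj, hm⟩ := h; subst hj; subst hm
        refine ⟨by simp, ?_, ?_⟩
        · intro y hy
          rcases List.mem_cons.mp hy with h | h
          · rw [h]
          · exact le_trans hxm (hmin0 y h)
        · rw [PySem.List.index?_cons_self]
      · rw [if_neg hxm] at h
        simp only [Option.some.injEq, Prod.mk.injEq] at h
        obtain ⟨hj, hm⟩ := h; subst hm
        have hlt : m0 < x := not_le.mp hxm
        refine ⟨List.mem_cons_of_mem _ hmem0, ?_, ?_⟩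
        · intro y hy
          rcases List.mem_cons.mp hy with h | h
          · rw [h]; exact le_of_lt hlt
          · exact hmin0 y h
        · rw [PySem.List.index?_cons_of_ne _ (Ne.symm (ne_of_lt hlt)), hidx0, ← hj]
          rfl

theorem argmin?_map_add (k : Int) (l : List Int) :
    argmin? (l.map (· + k)) = (argmin? l).map (fun p => (p.1, p.2 + k)) := by
  induction l with
  | nil => rfl
  | cons x r ih =>
    simp only [List.map_cons]
    cases hr : argmin? r with
    | none =>
      have hr' : argmin? (r.map (· + k)) = none := by rw [ih, hr]; rfl
      rw [argmin?_cons_none _ _ hr', argmin?_cons_none x r hr]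
      rfl
    | some p =>
      obtain ⟨j, m⟩ := p
      have hr' : argmin? (r.map (· + k)) = some (j, m + k) := by rw [ih, hr]; rfl
      rw [argmin?_cons_some _ _ _ _ hr', argmin?_cons_some x r j m hr]
      by_cases hxm : x ≤ m
      · rw [if_pos hxm, if_pos (show x + k ≤ m + k from Int.add_le_add_right hxm k)]
        rfl
      · rw [if_neg hxm, if_neg (show ¬(x + k ≤ m + k) from fun hh => hxm (Int.le_of_add_le_add_right hh))]
        rfl

-- first argmin of a nonempty list, via min?/index?
theorem index_min_eq_argmin (x : Int) (r : List Int) (j : Nat) (m : Int)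
    (h : argmin? (x :: r) = some (j, m)) :
    (((PySem.List.index? (x :: r) ((PySem.List.min? (x :: r) (fun y => y)).getD 0)).getD 0 : Nat) : Int) = (j : Int) := by
  obtain ⟨hmem, hmin, hidx⟩ := argmin?_props (x :: r) j m h
  obtain ⟨m', hm'⟩ : ∃ m', PySem.List.min? (x :: r) (fun y => y) = some m' := by
    cases hmm : PySem.List.min? (x :: r) (fun y => y) with
    | none => exact absurd ((PySem.List.min?_eq_none_iff _ _).mp hmm) (by simp)
    | some m' => exact ⟨m', rfl⟩
  have hmem' : m' ∈ x :: r := PySem.List.min?_mem hm'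
  have hm'min : ∀ y ∈ x :: r, m' ≤ y := PySem.List.min?_isMin hm'
  have heq : m' = m := le_antisymm (hm'min m hmem) (hmin m' hmem')
  rw [hm', Option.getD_some, heq, hidx, Option.getD_some]

-- length and elementwise characterization of A's counter sequence
theorem length_countsFrom (cs : List Char) : ∀ c, (countsFrom cs c).length = cs.length := by
  induction cs with
  | nil => intro c; rfl
  | cons ch r ih => intro c; simp [countsFrom, ih]

theorem countsFrom_getElem (cs : List Char) : ∀ (c : Int) (j : Nat) (h : j < (countsFrom cs c).length),
    (countsFrom cs c)[j] = c + cntN (cs.take (j + 1)) - cntC (cs.take (j + 1)) := by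
  induction cs with
  | nil => intro c j h; simp [countsFrom] at h
  | cons ch r ih =>
    intro c j h
    cases j with
    | zero =>
      simp only [countsFrom, List.getElem_cons_zero, List.take_succ_cons, List.take_zero,
        cntN, cntC, List.countP_cons, List.countP_nil]
      by_cases hc : ch == 'N' <;> simp [hc] <;> ring
    | succ j' =>
      simp only [countsFrom, List.getElem_cons_succ]
      rw [ih]
      simp only [List.take_succ_cons, cntN, cntC, List.countP_cons]
      by_cases hc : ch == 'N' <;> simp [hc] <;> (try push_cast) <;> first | rfl | ring | omega

-- ===== characterization of B's arrays =====

theorem prefN_fold_spec (cs : List Char) (n : Nat) (hn : n = cs.length) : ∀ (m : Nat), m ≤ n →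
    (((List.range m).foldl
        (fun arr i => arr.set (i + 1) (arr.getD i 0 + (if cs.getD i ' ' == 'N' then (1 : Int) else 0)))
        (List.replicate (n + 1) (0 : Int))).length = n + 1 ∧
     ∀ j ≤ n, ((List.range m).foldl
        (fun arr i => arr.set (i + 1) (arr.getD i 0 + (if cs.getD i ' ' == 'N' then (1 : Int) else 0)))
        (List.replicate (n + 1) (0 : Int))).getD j 0 = if j ≤ m then cntN (cs.take j) else 0) := by
  intro m
  induction m with
  | zero =>
    intro _
    refine ⟨by simp, ?_⟩
    intro j hj
    simp only [List.range_zero, List.foldl_nil, List.getD_eq_getElem?_getD,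
      List.getElem?_replicate]
    rw [if_pos (by omega : j < n + 1)]
    by_cases h0 : j = 0
    · subst h0; simp [cntN]
    · rw [if_neg (by omega : ¬ j ≤ 0)]
      rfl
  | succ m ih =>
    intro hm
    obtain ⟨hlen, hch⟩ := ih (by omega)
    rw [List.range_succ, List.foldl_append, List.foldl_cons, List.foldl_nil]
    constructor
    · rw [List.length_set]; exact hlen
    · intro j hj
      by_cases hjm : j = m + 1
      · subst hjm
        rw [List.getD_eq_getElem?_getD, List.getElem?_set_self (by rw [hlen]; omega),
          Option.getD_some]
        rw [hch m (by omega), if_pos (le_refl m),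
          if_pos (show m + 1 ≤ m + 1 from le_refl _)]
        have hmlt : m < cs.length := by omega
        have hgd : cs.getD m ' ' = cs[m] := List.getD_eq_getElem cs ' ' hmlt
        have htk : cs.take (m + 1) = cs.take m ++ [cs[m]] := by
          rw [List.take_add_one, List.getElem?_eq_getElem hmlt]; rfl
        rw [htk, hgd]
        simp only [cntN, List.countP_append, List.countP_cons, List.countP_nil]
        by_cases hc : cs[m] = 'N' <;> simp [hc] <;> (try push_cast) <;> first | rfl | ring | omega
      · rw [List.getD_eq_getElem?_getD, List.getElem?_set_ne (by omega), ← List.getD_eq_getElem?_getD,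
          hch j hj]
        split_ifs <;> first | rfl | omega

theorem sufC_fold_spec (cs : List Char) (n : Nat) (hn : n = cs.length) : ∀ (m : Nat), m ≤ n →
    ∀ (arr : List Int), arr.length = n + 1 → (∀ j, m ≤ j → j ≤ n → arr.getD j 0 = cntC (cs.drop j)) →
    ((((List.range m).reverse).foldl
        (fun arr i => arr.set i (arr.getD (i + 1) 0 + (if cs.getD i ' ' ≠ 'N' then (1 : Int) else 0))) arr).length = n + 1 ∧
     ∀ j ≤ n, (((List.range m).reverse).foldl
        (fun arr i => arr.set i (arr.getD (i + 1) 0 + (if cs.getD i ' ' ≠ 'N' then (1 : Int) else 0))) arr).getD j 0 = cntC (cs.drop j)) := by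
  intro m
  induction m with
  | zero =>
    intro _ arr hlen hinv
    exact ⟨hlen, fun j hj => hinv j (Nat.zero_le j) hj⟩
  | succ m ih =>
    intro hm arr hlen hinv
    have hrev : (List.range (m + 1)).reverse = m :: (List.range m).reverse := by
      rw [List.range_succ, List.reverse_append]; rfl
    simp only [hrev, List.foldl_cons]
    refine ih (by omega) _ (by simp [hlen]) ?_
    intro j hmj hjn
    by_cases hjm : j = m
    · subst hjm
      rw [List.getD_eq_getElem?_getD, List.getElem?_set_self (by rw [hlen]; omega),
        Option.getD_some]
      rw [hinv (j + 1) (by omega) (by omega)]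
      have hjlt : j < cs.length := by omega
      have hdrop : cs.drop j = cs[j] :: cs.drop (j + 1) := List.drop_eq_getElem_cons hjlt
      have hgd : cs.getD j ' ' = cs[j] := List.getD_eq_getElem cs ' ' hjlt
      rw [hdrop, hgd]
      simp only [cntC, List.countP_cons]
      by_cases hc : cs[j] = 'N' <;> simp [hc] <;> (try push_cast) <;> first | rfl | ring | omega
    · rw [List.getD_eq_getElem?_getD, List.getElem?_set_ne (by omega), ← List.getD_eq_getElem?_getD]
      exact hinv j (by omega) hjn

-- the materialized penalty table is A's counter sequence shifted by a constant, with
-- the j = 0 penalty (all customer hours) in front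
theorem pens_eq (cs : List Char) (c0 : Int) :
    (List.range (cs.length + 1)).map (fun j =>
        ((List.range cs.length).foldl
          (fun arr i => arr.set (i + 1) (arr.getD i 0 + (if cs.getD i ' ' == 'N' then (1 : Int) else 0)))
          (List.replicate (cs.length + 1) (0 : Int))).getD j 0 +
        (((List.range cs.length).reverse).foldl
          (fun arr i => arr.set i (arr.getD (i + 1) 0 + (if cs.getD i ' ' ≠ 'N' then (1 : Int) else 0)))
          (List.replicate (cs.length + 1) (0 : Int))).getD j 0)
      = (c0 + (cntC cs - c0)) :: (countsFrom cs c0).map (· + (cntC cs - c0)) := by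
  have hpref := prefN_fold_spec cs cs.length rfl cs.length (le_refl _)
  have hinv0 : ∀ j, cs.length ≤ j → j ≤ cs.length →
      (List.replicate (cs.length + 1) (0 : Int)).getD j 0 = cntC (cs.drop j) := by
    intro j hj hj'
    have hje : j = cs.length := le_antisymm hj' hj
    subst hje
    simp [cntC, List.getD_eq_getElem?_getD, List.getElem?_replicate]
  have hsuf := sufC_fold_spec cs cs.length rfl cs.length (le_refl _)
      (List.replicate (cs.length + 1) (0 : Int)) (by simp) hinv0
  obtain ⟨hplen, hpch⟩ := hpref
  obtain ⟨hslen, hsch⟩ := hsuf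
  apply List.ext_getElem
  · simp [length_countsFrom]
  · intro j h1 h2
    have hjn : j ≤ cs.length := by
      simp only [List.length_map, List.length_range] at h1
      omega
    rw [List.getElem_map, List.getElem_range]
    rw [hpch j hjn, if_pos hjn, hsch j hjn]
    cases j with
    | zero =>
      simp only [List.getElem_cons_zero, List.take_zero, List.drop_zero]
      simp [cntN]
    | succ j' =>
      have hj' : j' < (countsFrom cs c0).length := by
        rw [length_countsFrom]
        simp only [List.length_map, List.length_range] at h1
        omega
      rw [List.getElem_cons_succ, List.getElem_map, countsFrom_getElem cs c0 j' hj']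
      have hsplit : cntC cs = cntC (cs.take (j' + 1)) + cntC (cs.drop (j' + 1)) := by
        unfold cntC
        conv_lhs => rw [← List.take_append_drop (j' + 1) cs]
        rw [List.countP_append]
        push_cast; ring
      rw [hsplit]; ring

-- ===== VERDICT (by name: the statement is the Claim_ definition above) =====
theorem bestClosingTime_spec : Claim_equal_bestClosingTime := by
  intro customers _
  unfold Spec_bestClosingTime bestClosingTime bestClosingTime_alt
  simp only []
  rw [go_eq_fam, fam_char,
      pens_eq customers.toList ((PySem.Str.count customers "Y" : Int))]
  set cs := customers.toList with hcs
  set c0 : Int := (PySem.Str.count customers "Y" : Int) with hc0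
  set k : Int := cntC cs - c0 with hk
  cases hA : argmin? (countsFrom cs c0) with
  | none =>
    have hce : countsFrom cs c0 = [] := (argmin?_eq_none_iff _).mp hA
    rw [hce]
    have harg : argmin? ((c0 + k) :: List.map (· + k) ([] : List Int)) = some (0, c0 + k) :=
      argmin?_cons_none _ _ rfl
    rw [index_min_eq_argmin _ _ _ _ harg]
    simp
  | some p =>
    obtain ⟨j, m⟩ := p
    dsimp only
    have htail : argmin? (List.map (· + k) (countsFrom cs c0)) = some (j, m + k) := by
      rw [show List.map (· + k) (countsFrom cs c0) = (countsFrom cs c0).map (· + k) from rfl,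
          argmin?_map_add, hA]
      rfl
    have harg := argmin?_cons_some (c0 + k) _ j (m + k) htail
    by_cases hmc : m < c0
    · rw [if_neg (show ¬(c0 + k ≤ m + k) from
        fun hh => absurd (Int.le_of_add_le_add_right hh) (not_le.mpr hmc))] at harg
      rw [index_min_eq_argmin _ _ _ _ harg, if_pos hmc]
      push_cast; ring
    · rw [if_pos (show c0 + k ≤ m + k from Int.add_le_add_right (not_lt.mp hmc) k)] at harg
      rw [index_min_eq_argmin _ _ _ _ harg, if_neg hmc]
      simp
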